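-- pv_equiv track=rewrite | github.com/BFangs/practice_problems | test_tail_recursion.py | find_pop
-- ===== SOURCE A (Python) =====
-- def find_pop(lst, item):
--     if not lst:
--         return 0
--     check = lst.pop()
--     if check==item:
--         return -1
--     else:
--         return -1 - find_pop(lst, item)
-- ===== SOURCE B (Python) =====
-- def find_pop(lst, item):
--     n = len(lst)
--     i = n - 1
--     while i >= 0 and lst[i] != item:
--         i -= 1
--     if i >= 0:
--         del lst[i:]
--         return -1 if (n - 1 - i) % 2 == 0 else 0
--     lst.clear()
--     return 0 if n % 2 == 0 else -1
-- ===== Notes on version B (the rewrite author's own statement) =====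
-- stated objective: alternative
-- what changed: Replaces A's recursive pop/negate recurrence by a single index scan for the last occurrence of item plus a closed-form parity formula for the signed count (same mutation of lst: elements from the last match, or all if absent, are removed).
import Mathlib
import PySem

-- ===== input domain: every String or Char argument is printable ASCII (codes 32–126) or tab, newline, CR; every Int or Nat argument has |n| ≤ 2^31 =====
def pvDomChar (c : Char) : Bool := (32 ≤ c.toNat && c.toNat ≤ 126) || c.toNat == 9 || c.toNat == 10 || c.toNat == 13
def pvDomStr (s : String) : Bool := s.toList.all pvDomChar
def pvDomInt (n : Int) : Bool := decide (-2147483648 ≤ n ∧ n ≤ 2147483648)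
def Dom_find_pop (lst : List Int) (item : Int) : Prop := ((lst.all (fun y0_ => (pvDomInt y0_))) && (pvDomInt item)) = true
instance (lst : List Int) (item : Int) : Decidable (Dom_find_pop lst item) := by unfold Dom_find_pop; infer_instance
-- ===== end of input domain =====

-- B replaces A's recursive pop/negate recurrence with an index scan for the last
-- occurrence plus a closed-form parity formula; A and B both pop the same suffix
-- of lst in Python — the mutation is identical, the theorem is about the return value.

-- ===== PORT A =====
-- A: if empty return 0; pop the last element; if it equals item return -1, else -1 - recurse.
def find_pop (lst : List Int) (item : Int) : Int :=
  if h : lst = [] then 0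
  else
    let check := lst.getLast h
    if check = item then -1
    else -1 - find_pop lst.dropLast item
termination_by lst.length
decreasing_by
  have := List.length_pos_of_ne_nil h
  simp only [List.length_dropLast]
  omega

-- ===== PORT B =====
-- the while loop `i = n-1; while i >= 0 and lst[i] != item: i -= 1`, with j = i + 1 : Nat
def fpScan (lst : List Int) (item : Int) : Nat → Nat
  | 0 => 0
  | j + 1 => if lst.getD j 0 ≠ item then fpScan lst item j else j + 1

def find_pop_alt (lst : List Int) (item : Int) : Int :=
  let n := lst.length
  let j := fpScan lst item n
  if j > 0 then (if (n - j) % 2 = 0 then -1 else 0)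
  else (if n % 2 = 0 then 0 else -1)

-- ===== PRECONDITION & SPEC =====
def Spec_find_pop (lst : List Int) (item : Int) (out : Int) : Prop := out = find_pop_alt lst item
instance (lst : List Int) (item : Int) (out : Int) : Decidable (Spec_find_pop lst item out) := by unfold Spec_find_pop; infer_instance

-- ===== CLAIM (what is proved, stated in full; the proofs are below) =====
def Claim_equal_find_pop : Prop := ∀ (lst : List Int) (item : Int), Dom_find_pop lst item → Spec_find_pop lst item (find_pop lst item)

-- ===== LEMMAS AND PROOFS =====

theorem fpScan_le (lst : List Int) (item : Int) (j : Nat) : fpScan lst item j ≤ j := by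
  induction j with
  | zero => simp [fpScan]
  | succ k ih =>
    simp only [fpScan]
    split
    · exact Nat.le_succ_of_le ih
    · exact Nat.le_refl _

-- scanning below the old length ignores the appended element
theorem fpScan_append (xs : List Int) (x item : Int) (j : Nat) (hj : j ≤ xs.length) :
    fpScan (xs ++ [x]) item j = fpScan xs item j := by
  induction j with
  | zero => rfl
  | succ k ih =>
    have hk : k < xs.length := hj
    simp only [fpScan, List.getD_append _ _ _ _ hk, ih (Nat.le_of_lt hk)]

theorem find_pop_nil (item : Int) : find_pop [] item = 0 := by
  rw [find_pop]; rfl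

theorem find_pop_concat (xs : List Int) (x item : Int) :
    find_pop (xs ++ [x]) item =
      if x = item then -1 else -1 - find_pop xs item := by
  rw [find_pop]
  have h : xs ++ [x] ≠ [] := by simp
  simp [h]

theorem find_pop_eq_alt (lst : List Int) (item : Int) :
    find_pop lst item = find_pop_alt lst item := by
  induction lst using List.reverseRecOn with
  | nil => simp [find_pop_nil, find_pop_alt, fpScan]
  | append_singleton xs x ih =>
    rw [find_pop_concat, ih]
    simp only [find_pop_alt, List.length_append, List.length_singleton]
    by_cases hx : x = item
    · -- last element matches: scan stops immediately
      subst hx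
      have hscan : fpScan (xs ++ [x]) x (xs.length + 1) = xs.length + 1 := by
        simp [fpScan]
      rw [hscan]
      simp
    · -- last element differs: scan continues into xs
      have hget : (xs ++ [x]).getD xs.length 0 = x := by
        simp
      have hscan : fpScan (xs ++ [x]) item (xs.length + 1) = fpScan xs item xs.length := by
        simp only [fpScan, hget]
        rw [if_pos hx, fpScan_append xs x item xs.length (Nat.le_refl _)]
      rw [hscan]
      have hle := fpScan_le xs item xs.length
      set j := fpScan xs item xs.length with hj
      by_cases hjp : j > 0
      · have h1 : (xs.length + 1 - j) % 2 = (xs.length - j + 1) % 2 := by omega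
        rw [if_neg hx, if_pos hjp, if_pos hjp, h1]
        rcases Nat.even_or_odd (xs.length - j) with he | ho
        · have : (xs.length - j) % 2 = 0 := Nat.even_iff.mp he
          have h2 : (xs.length - j + 1) % 2 = 1 := by omega
          rw [if_pos this, h2]; norm_num
        · have : (xs.length - j) % 2 = 1 := Nat.odd_iff.mp ho
          have h2 : (xs.length - j + 1) % 2 = 0 := by omega
          rw [if_neg (by omega), if_pos h2]; norm_num
      · rw [if_neg hx, if_neg hjp, if_neg hjp]
        rcases Nat.even_or_odd xs.length with he | ho
        · have h0 : xs.length % 2 = 0 := Nat.even_iff.mp he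
          rw [if_pos h0, if_neg (by omega)]; norm_num
        · have h0 : xs.length % 2 = 1 := Nat.odd_iff.mp ho
          rw [if_neg (by omega), if_pos (by omega)]; norm_num

-- ===== VERDICT (by name: the statement is the Claim_ definition above) =====
theorem find_pop_spec : Claim_equal_find_pop := by
  intro lst item _
  exact find_pop_eq_alt lst item
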